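-- pv_equiv track=rewrite | github.com/igorvanloo/Project-Euler-Explained | Finished Problems/pe00752 - Powers of 1 + sqrt(7).py | quad_power
-- ===== SOURCE A (Python) =====
-- def quad_power(n, mod):
--     #(1 + sqrt(7))^n = (a(n) + b(n)sqrt(7))
--     #(1 + sqrt(7))^(n + 1) = (a(n) + 7b(n)) + (a(n) + b(n))sqrt(7)
--     # => a(n + 1) = a(n) + 7b(n), b(n + 1) = a(n) + b(n)
--     #(1 + sqrt(7))^(2n) = (a(n) + b(n)sqrt(7))(a(n) + b(n)sqrt(7))
--     #                   = a(n)^2 + 7b(n)^2 + 2a(n)b(n)sqrt(7)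
--     a_res, b_res = 1, 0
--     a_sq, b_sq = 1, 1
--     while n != 0:
--         if n % 2 == 1:
--             a_res, b_res = (a_sq*a_res + 7*b_sq*b_res) % mod, (a_sq*b_res + b_sq*a_res) % mod
--             n -= 1
--         a_sq, b_sq = (a_sq*a_sq + 7*b_sq*b_sq) % mod, 2*a_sq*b_sq % mod
--         n //= 2
--     return a_res, b_res
-- ===== SOURCE B (Python) =====
-- def quad_power(n, mod):
--     # Recursive divide-and-conquer exponentiation of (1 + sqrt(7)) over n//2,
--     # instead of A's iterative right-to-left bit-scanning accumulator loop.
--     def power(k):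
--         if k == 0:
--             return 1, 0
--         a, b = power(k // 2)
--         a, b = (a * a + 7 * b * b) % mod, (2 * a * b) % mod
--         if k % 2 == 1:
--             a, b = (a + 7 * b) % mod, (a + b) % mod
--         return a, b
--     return power(n)
-- ===== Notes on version B (the rewrite author's own statement) =====
-- stated objective: alternative
-- what changed: Replaces A's iterative right-to-left square-and-multiply loop (accumulator pair plus running square pair) with a top-down recursive halving: power(n//2) is squared and, for odd n, multiplied by the base (1+sqrt 7).
import Mathlib
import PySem

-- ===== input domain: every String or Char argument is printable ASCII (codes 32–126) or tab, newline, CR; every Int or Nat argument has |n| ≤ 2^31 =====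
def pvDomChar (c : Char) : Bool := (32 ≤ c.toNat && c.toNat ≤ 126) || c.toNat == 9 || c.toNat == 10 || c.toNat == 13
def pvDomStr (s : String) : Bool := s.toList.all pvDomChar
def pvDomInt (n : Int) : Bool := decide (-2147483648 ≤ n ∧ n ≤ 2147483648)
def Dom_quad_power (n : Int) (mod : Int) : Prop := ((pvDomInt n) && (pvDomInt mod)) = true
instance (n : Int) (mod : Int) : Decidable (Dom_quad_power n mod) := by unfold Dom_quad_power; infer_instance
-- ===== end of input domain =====

-- B replaces A's iterative right-to-left square-and-multiply accumulator loop by a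
-- top-down recursive halving (square power(n//2), multiply by the base when n is odd);
-- same asymptotic cost, different decomposition.


-- ===== PORT A =====
-- A's while-loop: right-to-left bit scan with accumulator (a_res, b_res) and running
-- square (a_sq, b_sq); the loop counter is Nat (Python's loop only terminates for n ≥ 0,
-- and Pre_ restricts to 0 ≤ n).
def quadLoopA (mod : Int) (k : Nat) (res sq : Int × Int) : Int × Int :=
  if k = 0 then res
  else
    quadLoopA mod ((if k % 2 = 1 then k - 1 else k) / 2)
      (if k % 2 = 1 then
        (PySem.Int.mod (sq.1 * res.1 + 7 * sq.2 * res.2) mod,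
         PySem.Int.mod (sq.1 * res.2 + sq.2 * res.1) mod)
       else res)
      (PySem.Int.mod (sq.1 * sq.1 + 7 * sq.2 * sq.2) mod,
       PySem.Int.mod (2 * sq.1 * sq.2) mod)
termination_by k
decreasing_by split <;> omega

def quad_power (n : Int) (mod : Int) : Int × Int :=
  quadLoopA mod n.toNat (1, 0) (1, 1)

-- ===== PORT B =====
-- B's recursive helper power(k): square power(k//2), multiply by the base when k is odd.
def powerB (mod : Int) (k : Nat) : Int × Int :=
  if k = 0 then (1, 0)
  else
    let p := powerB mod (k / 2)
    let a := PySem.Int.mod (p.1 * p.1 + 7 * p.2 * p.2) mod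
    let b := PySem.Int.mod (2 * p.1 * p.2) mod
    if k % 2 = 1 then (PySem.Int.mod (a + 7 * b) mod, PySem.Int.mod (a + b) mod)
    else (a, b)
termination_by k
decreasing_by omega

def quad_power_alt (n : Int) (mod : Int) : Int × Int :=
  powerB mod n.toNat

-- ===== PRECONDITION & SPEC =====
-- Pre_ is exactly where Python A returns: for n < 0 the while-loop never terminates,
-- and for n > 0 with mod = 0 the '%' raises ZeroDivisionError (n = 0 returns (1,0) for any mod).
def Pre_quad_power (n : Int) (mod : Int) : Prop := 0 ≤ n ∧ (mod ≠ 0 ∨ n = 0)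
instance (n : Int) (mod : Int) : Decidable (Pre_quad_power n mod) := by unfold Pre_quad_power; infer_instance
def pvWitness_quad_power : Int × Int := (13, 10)

def Spec_quad_power (n : Int) (mod : Int) (out : Int × Int) : Prop := out = quad_power_alt n mod
instance (n : Int) (mod : Int) (out : Int × Int) : Decidable (Spec_quad_power n mod out) := by unfold Spec_quad_power; infer_instance

-- ===== CLAIM (what is proved, stated in full; the proofs are below) =====
def Claim_equal_quad_power : Prop := ∀ (n : Int) (mod : Int), Dom_quad_power n mod → Pre_quad_power n mod → Spec_quad_power n mod (quad_power n mod)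


-- ===== LEMMAS AND PROOFS =====

-- transport an Int.ModEq along equalities of its two sides (used to reassociate ring terms)
theorem pvModEq_congr {m a b a' b' : Int} (ea : a = a') (eb : b = b')
    (h : a ≡ b [ZMOD m]) : a' ≡ b' [ZMOD m] := ea ▸ eb ▸ h

-- The exact (un-reduced) arithmetic both programs track lives in ℤ[√7] = Zsqrtd 7.
def pvBase : Zsqrtd 7 := ⟨1, 1⟩

-- "the pair p is componentwise congruent to z mod m"
def pvCong (m : Int) (p : Int × Int) (z : Zsqrtd 7) : Prop :=
  p.1 ≡ z.re [ZMOD m] ∧ p.2 ≡ z.im [ZMOD m]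

-- normal form: both components reduced by Python's %
def pvN (m : Int) (z : Zsqrtd 7) : Int × Int :=
  (PySem.Int.mod z.re m, PySem.Int.mod z.im m)

-- Python's % only depends on the residue class (any m, including m = 0 and m < 0).
theorem pvmod_congr (m a x : Int) (h : a ≡ x [ZMOD m]) :
    PySem.Int.mod a m = PySem.Int.mod x m := by
  rcases lt_trichotomy m 0 with hm | hm | hm
  · have h1 : PySem.Int.mod a m = - PySem.Int.mod (-a) (-m) := by
      rw [← PySem.Int.mod_neg_neg]; simp
    have h2 : PySem.Int.mod x m = - PySem.Int.mod (-x) (-m) := by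
      rw [← PySem.Int.mod_neg_neg]; simp
    rw [h1, h2, PySem.Int.mod_eq_emod_of_pos (by omega : (0:Int) < -m),
      PySem.Int.mod_eq_emod_of_pos (by omega : (0:Int) < -m)]
    have : -a ≡ -x [ZMOD -m] := (Int.ModEq.neg h).of_dvd ⟨-1, by ring⟩
    rw [this]
  · subst hm
    have : a = x := by simpa [Int.ModEq] using h
    rw [this]
  · rw [PySem.Int.mod_eq_emod_of_pos hm, PySem.Int.mod_eq_emod_of_pos hm]; exact h

theorem pvmod_modEq (m a : Int) : PySem.Int.mod a m ≡ a [ZMOD m] := by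
  rw [Int.modEq_iff_dvd]
  exact ⟨PySem.Int.floordiv a m, by
    have := PySem.Int.floordiv_mul_add_mod a m
    linarith [mul_comm (PySem.Int.floordiv a m) m]⟩

theorem pvCong_N (m : Int) (z : Zsqrtd 7) : pvCong m (pvN m z) z :=
  ⟨pvmod_modEq m z.re, pvmod_modEq m z.im⟩

theorem pvN_eq_of_cong {m a b : Int} {z : Zsqrtd 7} (h : pvCong m (a, b) z) :
    (PySem.Int.mod a m, PySem.Int.mod b m) = pvN m z := by
  unfold pvN
  rw [pvmod_congr m a z.re h.1, pvmod_congr m b z.im h.2]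

-- reducing a congruent pair componentwise keeps the congruence
theorem pvCong_mod {m a b : Int} {z : Zsqrtd 7} (h : pvCong m (a, b) z) :
    pvCong m (PySem.Int.mod a m, PySem.Int.mod b m) z :=
  ⟨(pvmod_modEq m a).trans h.1, (pvmod_modEq m b).trans h.2⟩

theorem pvCong_mul {m : Int} {p q : Int × Int} {z w : Zsqrtd 7}
    (hp : pvCong m p z) (hq : pvCong m q w) :
    pvCong m (p.1 * q.1 + 7 * p.2 * q.2, p.1 * q.2 + p.2 * q.1) (z * w) := by
  constructor
  · show p.1 * q.1 + 7 * p.2 * q.2 ≡ (z * w).re [ZMOD m]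
    rw [Zsqrtd.re_mul]
    exact (hp.1.mul hq.1).add
      (pvModEq_congr (by ring) (by ring) ((hp.2.mul hq.2).mul_left 7))
  · show p.1 * q.2 + p.2 * q.1 ≡ (z * w).im [ZMOD m]
    rw [Zsqrtd.im_mul]
    exact (hp.1.mul hq.2).add (hp.2.mul hq.1)

-- the squared pair A and B both form (second component written 2*a*b) is congruent to z*z
theorem pvCong_sq {m : Int} {p : Int × Int} {z : Zsqrtd 7} (hp : pvCong m p z) :
    pvCong m (p.1 * p.1 + 7 * p.2 * p.2, 2 * p.1 * p.2) (z * z) := by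
  have h := pvCong_mul hp hp
  exact ⟨h.1, pvModEq_congr (by ring) rfl h.2⟩

-- B's odd step (multiply a reduced pair by the base 1 + √7)
theorem pvCong_base_mul {m : Int} {p : Int × Int} {x : Zsqrtd 7} (h : pvCong m p x) :
    pvCong m (p.1 + 7 * p.2, p.1 + p.2) (pvBase * x) := by
  constructor
  · show p.1 + 7 * p.2 ≡ (pvBase * x).re [ZMOD m]
    rw [Zsqrtd.re_mul, show pvBase.re = 1 from rfl, show pvBase.im = 1 from rfl]
    exact pvModEq_congr rfl (by ring) (h.1.add (h.2.mul_left 7))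
  · show p.1 + p.2 ≡ (pvBase * x).im [ZMOD m]
    rw [Zsqrtd.im_mul, show pvBase.re = 1 from rfl, show pvBase.im = 1 from rfl]
    exact pvModEq_congr rfl (by ring) (h.1.add h.2)

theorem pvCong_one (m : Int) : pvCong m ((1 : Int), (0 : Int)) (1 : Zsqrtd 7) :=
  ⟨by rw [Zsqrtd.re_one], by rw [Zsqrtd.im_one]⟩

theorem pvCong_pair_base (m : Int) : pvCong m ((1 : Int), (1 : Int)) pvBase :=
  ⟨Int.ModEq.refl 1, Int.ModEq.refl 1⟩

-- A's loop computes the reduced form of z * w^k (k > 0), given its state is congruent to (z, w).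
theorem quadLoopA_eq (m : Int) (k : Nat) (res sq : Int × Int) (z w : Zsqrtd 7)
    (hk : 0 < k) (hres : pvCong m res z) (hsq : pvCong m sq w) :
    quadLoopA m k res sq = pvN m (z * w ^ k) := by
  induction k using Nat.strong_induction_on generalizing res sq z w with
  | _ k ih =>
    have hk0 : ¬ k = 0 := by omega
    rw [quadLoopA]
    simp only [if_neg hk0]
    by_cases hodd : k % 2 = 1
    · simp only [hodd, reduceIte]
      have hres' := pvN_eq_of_cong (pvCong_mul hsq hres)
      rcases Nat.eq_zero_or_pos ((k - 1) / 2) with h0 | hpos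
      · have hk1 : k = 1 := by omega
        subst hk1
        rw [show ((1 - 1) / 2 : Nat) = 0 from rfl, quadLoopA]
        simp only [reduceIte]
        rw [hres', pow_one, mul_comm]
      · have hlt : (k - 1) / 2 < k := by omega
        rw [ih _ hlt _ _ (w * z) (w * w) hpos (pvCong_mod (pvCong_mul hsq hres))
            (pvCong_mod (pvCong_sq hsq))]
        congr 1
        rw [show w * w = w ^ 2 from by ring, ← pow_mul]
        conv_rhs => rw [show k = 2 * ((k - 1) / 2) + 1 from by omega]
        rw [pow_succ]
        ring
    · simp only [hodd, reduceIte]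
      have hpos : 0 < k / 2 := by omega
      have hlt : k / 2 < k := by omega
      rw [ih _ hlt _ _ z (w * w) hpos hres
          (pvCong_mod (pvCong_sq hsq))]
      congr 1
      rw [show w * w = w ^ 2 from by ring, ← pow_mul,
        show 2 * (k / 2) = k from by omega]

-- B's recursion computes the same reduced form of base^k (k > 0).
theorem powerB_eq (m : Int) (k : Nat) (hk : 0 < k) :
    powerB m k = pvN m (pvBase ^ k) := by
  induction k using Nat.strong_induction_on with
  | _ k ih =>
    have hk0 : ¬ k = 0 := by omega
    rw [powerB]
    simp only [if_neg hk0]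
    have hp : pvCong m (powerB m (k / 2)) (pvBase ^ (k / 2)) := by
      rcases Nat.eq_zero_or_pos (k / 2) with h0 | hpos
      · rw [h0, powerB]
        simpa using pvCong_one m
      · rw [ih _ (by omega) hpos]
        exact pvCong_N m _
    have hsq : (PySem.Int.mod ((powerB m (k / 2)).1 * (powerB m (k / 2)).1 +
          7 * (powerB m (k / 2)).2 * (powerB m (k / 2)).2) m,
        PySem.Int.mod (2 * (powerB m (k / 2)).1 * (powerB m (k / 2)).2) m)
          = pvN m (pvBase ^ (2 * (k / 2))) := by
      rw [pvN_eq_of_cong (pvCong_sq hp)]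
      congr 1
      rw [two_mul, pow_add]
    by_cases hodd : k % 2 = 1
    · simp only [hodd, reduceIte]
      have hx := pvCong_base_mul (pvCong_mod
        ((show pvBase ^ (k / 2) * pvBase ^ (k / 2) = pvBase ^ (2 * (k / 2)) from by
          rw [two_mul, pow_add]) ▸ pvCong_sq hp))
      rw [pvN_eq_of_cong hx]
      congr 1
      conv_rhs => rw [show k = 2 * (k / 2) + 1 from by omega]
      rw [pow_succ]
      ring
    · simp only [hodd, reduceIte]
      rw [hsq, show 2 * (k / 2) = k from by omega]

-- ===== VERDICT (by name: the statement is the Claim_ definition above) =====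
theorem quad_power_spec : Claim_equal_quad_power := by
  intro n m _ hpre
  show quad_power n m = quad_power_alt n m
  unfold quad_power quad_power_alt
  rcases Nat.eq_zero_or_pos n.toNat with h0 | hpos
  · rw [h0, quadLoopA, powerB]; rfl
  · rw [quadLoopA_eq m n.toNat (1, 0) (1, 1) 1 pvBase hpos (pvCong_one m)
        (pvCong_pair_base m), powerB_eq m n.toNat hpos, one_mul]
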